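-- pv_equiv track=rewrite | github.com/DavidKN10/DSA-resources | Exams/Midterm 1/main.py | f02
-- ===== SOURCE A (Python) =====
-- def f02(d: dict[str, set[int]]) -> dict[str, set[int]]:
--     result = {}
--
--     for key, value in d.items():
--         lowercase_key = key.lower()
--         if lowercase_key in result:
--             result[lowercase_key] |= value
--         else:
--             result[lowercase_key] = value
--
--     return result
-- ===== SOURCE B (Python) =====
-- def f02(d: dict[str, set[int]]) -> dict[str, set[int]]:
--     groups = {}
--     for key, value in d.items():
--         groups.setdefault(key.lower(), []).append(value)
--     result = {}
--     for lk, vals in groups.items():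
--         acc = vals[0]
--         for v in vals[1:]:
--             acc |= v
--         result[lk] = acc
--     return result
-- ===== Notes on version B (the rewrite author's own statement) =====
-- stated objective: alternative
-- what changed: B replaces A's single pass with in-place dict union by a two-pass decomposition: first group the values into lists keyed by lowercased key, then union each group's sets starting from its first set.
import Mathlib
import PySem

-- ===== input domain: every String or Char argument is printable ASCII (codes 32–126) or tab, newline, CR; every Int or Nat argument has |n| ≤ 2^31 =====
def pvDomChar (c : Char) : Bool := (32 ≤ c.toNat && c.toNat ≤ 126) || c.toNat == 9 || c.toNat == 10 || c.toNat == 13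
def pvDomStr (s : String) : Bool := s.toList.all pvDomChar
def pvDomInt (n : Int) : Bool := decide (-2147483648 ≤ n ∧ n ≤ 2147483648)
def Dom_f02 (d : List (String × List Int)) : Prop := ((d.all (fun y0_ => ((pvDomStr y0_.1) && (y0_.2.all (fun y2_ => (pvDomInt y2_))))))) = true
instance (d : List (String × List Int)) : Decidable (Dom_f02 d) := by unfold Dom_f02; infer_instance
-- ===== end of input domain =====

-- B merges the sets grouped by lowercased key in two passes (group, then union each group)
-- instead of A's single pass with in-place dict union; alternative decomposition, same cost.
-- Both Pythons return the first set OBJECT of each group mutated in place; equivalence here is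
-- about the returned value (A and B perform the same mutations).

-- ===== PORT A =====
def f02 (d : List (String × List Int)) : List (String × List Int) :=
  (d.foldl (fun result kv =>
      let lowercase_key := PySem.Str.lower kv.1
      if result.contains lowercase_key then
        result.insert lowercase_key (PySem.Set.union (result.getD lowercase_key []) kv.2)
      else
        result.insert lowercase_key kv.2)
    PySem.Dict.empty).items

-- ===== PORT B =====
-- acc = vals[0]; for v in vals[1:]: acc |= v   (groups' values are always nonempty, so vals[0] = headD)
def f02_mergeGroup (vals : List (List Int)) : List Int :=
  (vals.drop 1).foldl PySem.Set.union (vals.headD [])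

-- groups.setdefault(key.lower(), []).append(value) is Dict.modify lk [] (· ++ [value]): get-or-default, then append
def f02_alt (d : List (String × List Int)) : List (String × List Int) :=
  let groups := d.foldl (fun g kv => g.modify (PySem.Str.lower kv.1) [] (· ++ [kv.2])) PySem.Dict.empty
  (groups.items.foldl (fun r q => r.insert q.1 (f02_mergeGroup q.2)) PySem.Dict.empty).items

-- ===== PRECONDITION & SPEC =====
def Spec_f02 (d : List (String × List Int)) (out : List (String × List Int)) : Prop := out = f02_alt d
instance (d : List (String × List Int)) (out : List (String × List Int)) : Decidable (Spec_f02 d out) := by unfold Spec_f02; infer_instance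

-- ===== CLAIM (what is proved, stated in full; the proofs are below) =====
def Claim_equal_f02 : Prop := ∀ (d : List (String × List Int)), Dom_f02 d → Spec_f02 d (f02 d)

-- ===== LEMMAS AND PROOFS =====

-- A's loop body, named for the proofs
def f02_stepA (result : PySem.Dict String (List Int)) (kv : String × List Int) :
    PySem.Dict String (List Int) :=
  let lowercase_key := PySem.Str.lower kv.1
  if result.contains lowercase_key then
    result.insert lowercase_key (PySem.Set.union (result.getD lowercase_key []) kv.2)
  else
    result.insert lowercase_key kv.2

theorem f02_foldl_union_eq_update (s : List Int) (ts : List (List Int)) :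
    ts.foldl PySem.Set.union s = PySem.Set.update s ts.flatten := by
  induction ts generalizing s with
  | nil => simp [PySem.Set.update]
  | cons t ts ih => simp [List.foldl, ih, PySem.Set.update, List.foldl_append, PySem.Set.union]

theorem f02_stepA_eq_insert (st : PySem.Dict String (List Int)) (kv : String × List Int) :
    f02_stepA st kv = st.insert (PySem.Str.lower kv.1)
      (if st.contains (PySem.Str.lower kv.1)
       then PySem.Set.union (st.getD (PySem.Str.lower kv.1) []) kv.2 else kv.2) := by
  unfold f02_stepA; split <;> simp_all

-- Invariant of A's single pass: membership and value at every key c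
theorem f02_foldA_inv (d : List (String × List Int)) (st : PySem.Dict String (List Int))
    (c : String) :
    ((d.foldl f02_stepA st).contains c
        = (st.contains c || d.any (fun p => PySem.Str.lower p.1 == c)))
    ∧ ((d.foldl f02_stepA st).getD c []
        = if st.contains c
          then PySem.Set.update (st.getD c [])
                 ((d.filter (fun p => PySem.Str.lower p.1 == c)).map (·.2)).flatten
          else f02_mergeGroup ((d.filter (fun p => PySem.Str.lower p.1 == c)).map (·.2))) := by
  induction d generalizing st with
  | nil =>
    refine ⟨by simp, ?_⟩
    by_cases h : st.contains c
    · simp [h, PySem.Set.update]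
    · have h0 : st.getD c [] = [] :=
        PySem.Dict.getD_of_not_contains (k := c) st [] (by simp [h])
      simp [h, f02_mergeGroup, h0]
  | cons p d ih =>
    have hstep : ∀ c', (f02_stepA st p).contains c'
        = (c' == PySem.Str.lower p.1 || st.contains c') := by
      intro c'; rw [f02_stepA_eq_insert]; exact PySem.Dict.contains_insert _ _ _ _
    have hget : (f02_stepA st p).getD c []
        = if c = PySem.Str.lower p.1
          then (if st.contains (PySem.Str.lower p.1)
                then PySem.Set.union (st.getD (PySem.Str.lower p.1) []) p.2 else p.2)
          else st.getD c [] := by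
      rw [f02_stepA_eq_insert, PySem.Dict.getD_insert]
    obtain ⟨ihc, ihg⟩ := ih (f02_stepA st p)
    by_cases h : PySem.Str.lower p.1 = c
    · subst h
      constructor
      · simp [List.foldl, ihc, hstep]
      · simp only [List.foldl, ihg, hstep, hget]
        by_cases hc : st.contains (PySem.Str.lower p.1)
        · simp [hc, PySem.Set.union, PySem.Set.update, List.foldl_append]
        · simp [hc, f02_mergeGroup, f02_foldl_union_eq_update]
    · have hne : (PySem.Str.lower p.1 == c) = false := by simp [h]
      have hne2 : (c == PySem.Str.lower p.1) = false := by simp [Ne.symm h]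
      constructor
      · simp [List.foldl, ihc, hstep, hne, hne2]
      · simp [List.foldl, ihg, hstep, hget, hne, hne2, Ne.symm h]

-- groups.getD c [] is exactly the list of values whose lowered key is c
theorem f02_groups_getD (d : List (String × List Int)) (c : String) :
    (d.foldl (fun g kv => g.modify (PySem.Str.lower kv.1) [] (· ++ [kv.2]))
        PySem.Dict.empty).getD c []
      = (d.filter (fun p => PySem.Str.lower p.1 == c)).map (·.2) := by
  have h := PySem.Dict.getD_foldl_modify_append
      (l := d.map (fun kv => (PySem.Str.lower kv.1, kv.2)))
      (d := (PySem.Dict.empty : PySem.Dict String (List (List Int)))) (c := c)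
  rw [List.foldl_map] at h
  simpa [List.filter_map, Function.comp, List.map_map] using h

theorem f02_spec' : ∀ (d : List (String × List Int)), f02 d = f02_alt d := by
  intro d
  show (d.foldl f02_stepA PySem.Dict.empty).items = f02_alt d
  set G := d.foldl (fun g kv => g.modify (PySem.Str.lower kv.1) [] (· ++ [kv.2]))
      PySem.Dict.empty with hG
  -- keys of both dicts: first occurrences of lowered keys, in order, nodup
  have hkeysA : (d.foldl f02_stepA PySem.Dict.empty).keys
      = PySem.Set.ofList (d.map (fun p => PySem.Str.lower p.1)) := by
    have hfun : f02_stepA = fun st kv => st.insert (PySem.Str.lower kv.1)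
            (if st.contains (PySem.Str.lower kv.1)
             then PySem.Set.union (st.getD (PySem.Str.lower kv.1) []) kv.2 else kv.2) := by
      funext st kv; exact f02_stepA_eq_insert st kv
    rw [hfun, PySem.Dict.keys_foldl_insert_key]
    simp [PySem.Set.update_nil_left]
  have hnodA : (d.foldl f02_stepA PySem.Dict.empty).keys.Nodup := by
    rw [hkeysA]; exact PySem.Set.nodup_ofList _
  have hkeysG : G.keys = PySem.Set.ofList (d.map (fun p => PySem.Str.lower p.1)) := by
    rw [hG, PySem.Dict.keys_foldl_modify_key]
    simp [PySem.Set.update_nil_left]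
  have hnodG : G.keys.Nodup := by rw [hkeysG]; exact PySem.Set.nodup_ofList _
  -- B's second pass inserts fresh distinct keys, so its items are a map over G.items
  have hB : f02_alt d
      = G.items.map (fun q => (q.1, f02_mergeGroup q.2)) := by
    show (G.items.foldl (fun r q => r.insert q.1 (f02_mergeGroup q.2))
        PySem.Dict.empty).items = _
    rw [PySem.Dict.items_foldl_insert_fresh _ _ _ _ (fun a _ => PySem.Dict.contains_empty _) hnodG]
    rfl
  -- both items lists as maps over the common key list
  rw [hB, PySem.Dict.items_eq_map_keys _ hnodA ([] : List Int),
      PySem.Dict.items_eq_map_keys G hnodG ([] : List (List Int)), hkeysA, hkeysG, List.map_map]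
  apply List.map_congr_left
  intro c _
  have hA : (d.foldl f02_stepA PySem.Dict.empty).getD c []
      = f02_mergeGroup ((d.filter (fun p => PySem.Str.lower p.1 == c)).map (·.2)) := by
    simpa using (f02_foldA_inv d PySem.Dict.empty c).2
  simp only [Function.comp, hA]
  rw [hG, f02_groups_getD]

-- ===== VERDICT (by name: the statement is the Claim_ definition above) =====
theorem f02_spec : Claim_equal_f02 := by
  intro d _; exact f02_spec' d
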